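-- pv_equiv track=rewrite | github.com/ThomasUCF/MilVehicleSimEnv-for-Gym | merge_obspace.py | get_obspace_render
-- ===== SOURCE A (Python) =====
-- def get_obspace_render(observation_space, list_map, list_scenar, map_length, ied_mode, show_ied):
--     for y in range(map_length):
--         for x in range(map_length):
--             observation_space[y][x] = list_map[y][x]
--     for y in range(map_length):
--         for x in range(map_length):
--             if list_scenar[y][x] > 0:
--                 observation_space[y][x] = list_scenar[y][x]
--                 if ied_mode:
--                     if not show_ied:
--                         if observation_space[y][x] == 80:
--                             observation_space[y][x] = list_map[y][x]
--                 if not ied_mode: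
--                     if observation_space[y][x] == 80:
--                         observation_space[y][x] = list_map[y][x]
--
--     return observation_space
-- ===== SOURCE B (Python) =====
-- def get_obspace_render(observation_space, list_map, list_scenar, map_length, ied_mode, show_ied):
--     # Fused single pass: per row, one slice-assignment built from zipped map/scenario slices.
--     # Mutates observation_space in place and returns it, like the original.
--     keep = ied_mode and show_ied
--     for y in range(map_length):
--         observation_space[y][:map_length] = [
--             s if s > 0 and (s != 80 or keep) else m
--             for m, s in zip(list_map[y][:map_length], list_scenar[y][:map_length])
--         ]
--     return observation_space
-- ===== Notes on version B (the rewrite author's own statement) =====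
-- stated objective: simpler
-- what changed: A's two sequential full-grid index loops (copy pass, then overlay pass with nested mode/revert branches) are fused into one per-row slice assignment built from a single comprehension over the zipped map/scenario row slices, with the revert logic collapsed into one condition.
import Mathlib
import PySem

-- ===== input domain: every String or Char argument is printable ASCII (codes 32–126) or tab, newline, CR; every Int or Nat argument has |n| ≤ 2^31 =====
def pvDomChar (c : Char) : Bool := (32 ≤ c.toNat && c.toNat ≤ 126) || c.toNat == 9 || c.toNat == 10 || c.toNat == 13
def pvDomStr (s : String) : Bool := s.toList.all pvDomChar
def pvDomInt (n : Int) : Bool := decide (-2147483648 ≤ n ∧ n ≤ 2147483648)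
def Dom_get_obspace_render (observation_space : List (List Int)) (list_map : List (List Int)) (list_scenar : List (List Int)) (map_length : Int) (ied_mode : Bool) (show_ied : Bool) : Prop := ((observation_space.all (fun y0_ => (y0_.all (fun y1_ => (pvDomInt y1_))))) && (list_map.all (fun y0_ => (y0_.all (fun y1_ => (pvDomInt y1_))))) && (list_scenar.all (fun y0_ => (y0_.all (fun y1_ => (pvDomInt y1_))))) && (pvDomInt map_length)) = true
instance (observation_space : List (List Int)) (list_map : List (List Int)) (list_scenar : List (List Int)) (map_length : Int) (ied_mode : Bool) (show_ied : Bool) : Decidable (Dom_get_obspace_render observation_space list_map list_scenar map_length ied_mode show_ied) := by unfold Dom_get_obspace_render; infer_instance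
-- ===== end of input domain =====

-- B fuses A's copy pass and overlay pass into one per-row slice assignment (objective: simpler);
-- equivalence is about the RETURN value (both Pythons also mutate observation_space in the same way).

-- ===== PORT A =====
-- grid read g[y][x] / write g[y][x] = v; loop indices are ≥ 0, and inside Pre_ they are in
-- range, where getD / set are exact Python indexing.
def pvCell (g : List (List Int)) (y x : Int) : Int :=
  (g.getD y.toNat []).getD x.toNat 0

def pvSet (g : List (List Int)) (y x v : Int) : List (List Int) :=
  g.modify y.toNat (fun r => r.set x.toNat v)

def get_obspace_render (observation_space : List (List Int)) (list_map : List (List Int)) (list_scenar : List (List Int)) (map_length : Int) (ied_mode : Bool) (show_ied : Bool) : List (List Int) :=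
  let g1 := (PySem.List.pyRange 0 map_length 1).foldl (fun g y =>
    (PySem.List.pyRange 0 map_length 1).foldl (fun g x =>
      pvSet g y x (pvCell list_map y x)) g) observation_space
  (PySem.List.pyRange 0 map_length 1).foldl (fun g y =>
    (PySem.List.pyRange 0 map_length 1).foldl (fun g x =>
      if pvCell list_scenar y x > 0 then
        let g2 := pvSet g y x (pvCell list_scenar y x)
        let g3 := if ied_mode then
            (if !show_ied then (if pvCell g2 y x == 80 then pvSet g2 y x (pvCell list_map y x) else g2) else g2)
          else g2
        if !ied_mode then (if pvCell g3 y x == 80 then pvSet g3 y x (pvCell list_map y x) else g3) else g3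
      else g) g) g1

-- ===== PORT B =====
-- per Source B: one pass; observation_space[y][:map_length] = [s if s > 0 and (s != 80 or keep) else m
-- for m, s in zip(list_map[y][:map_length], list_scenar[y][:map_length])]; slice assignment is
-- 'new prefix ++ rest of the row'.
def get_obspace_render_alt (observation_space : List (List Int)) (list_map : List (List Int)) (list_scenar : List (List Int)) (map_length : Int) (ied_mode : Bool) (show_ied : Bool) : List (List Int) :=
  let keep := ied_mode && show_ied
  (PySem.List.pyRange 0 map_length 1).foldl (fun g y =>
    let merged := ((PySem.List.slice (list_map.getD y.toNat []) none (some map_length)).zip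
                   (PySem.List.slice (list_scenar.getD y.toNat []) none (some map_length))).map
        (fun p => if p.2 > 0 && (p.2 != 80 || keep) then p.2 else p.1)
    g.modify y.toNat (fun r => merged ++ r.drop (PySem.List.clampIdx r.length map_length))) observation_space

-- ===== PRECONDITION & SPEC =====
-- Pre_: exactly the inputs where A returns (no IndexError): the first map_length rows of each of
-- the three grids exist and each has at least map_length cells.
def Pre_get_obspace_render (observation_space : List (List Int)) (list_map : List (List Int)) (list_scenar : List (List Int)) (map_length : Int) (ied_mode : Bool) (show_ied : Bool) : Prop :=
  map_length ≤ (observation_space.length : Int) ∧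
  map_length ≤ (list_map.length : Int) ∧
  map_length ≤ (list_scenar.length : Int) ∧
  (∀ r ∈ observation_space.take map_length.toNat, map_length ≤ (r.length : Int)) ∧
  (∀ r ∈ list_map.take map_length.toNat, map_length ≤ (r.length : Int)) ∧
  (∀ r ∈ list_scenar.take map_length.toNat, map_length ≤ (r.length : Int))
instance (observation_space : List (List Int)) (list_map : List (List Int)) (list_scenar : List (List Int)) (map_length : Int) (ied_mode : Bool) (show_ied : Bool) : Decidable (Pre_get_obspace_render observation_space list_map list_scenar map_length ied_mode show_ied) := by unfold Pre_get_obspace_render; infer_instance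

def pvWitness_get_obspace_render : List (List Int) × List (List Int) × List (List Int) × Int × Bool × Bool :=
  ([[0]], [[1]], [[0]], 1, false, false)

def Spec_get_obspace_render (observation_space : List (List Int)) (list_map : List (List Int)) (list_scenar : List (List Int)) (map_length : Int) (ied_mode : Bool) (show_ied : Bool) (out : List (List Int)) : Prop := out = get_obspace_render_alt observation_space list_map list_scenar map_length ied_mode show_ied
instance (observation_space : List (List Int)) (list_map : List (List Int)) (list_scenar : List (List Int)) (map_length : Int) (ied_mode : Bool) (show_ied : Bool) (out : List (List Int)) : Decidable (Spec_get_obspace_render observation_space list_map list_scenar map_length ied_mode show_ied out) := by unfold Spec_get_obspace_render; infer_instance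

-- ===== CLAIM (what is proved, stated in full; the proofs are below) =====
def Claim_equal_get_obspace_render : Prop := ∀ (observation_space : List (List Int)) (list_map : List (List Int)) (list_scenar : List (List Int)) (map_length : Int) (ied_mode : Bool) (show_ied : Bool), Dom_get_obspace_render observation_space list_map list_scenar map_length ied_mode show_ied → Pre_get_obspace_render observation_space list_map list_scenar map_length ied_mode show_ied → Spec_get_obspace_render observation_space list_map list_scenar map_length ied_mode show_ied (get_obspace_render observation_space list_map list_scenar map_length ied_mode show_ied)

-- ===== LEMMAS AND PROOFS =====

-- pyRange 0 n 1 as a Nat range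
theorem pv_pyRange_eq (n : Int) :
    PySem.List.pyRange 0 n 1 = (List.range n.toNat).map (fun (k : Nat) => (k : Int)) := by
  rw [PySem.List.pyRange_one]
  simp only [sub_zero, zero_add]

theorem pv_foldl_pyRange {α : Type} (f : α → Int → α) (n : Int) (init : α) :
    (PySem.List.pyRange 0 n 1).foldl f init
      = (List.range n.toNat).foldl (fun (a : α) (k : Nat) => f a (k : Int)) init := by
  rw [pv_pyRange_eq, List.foldl_map]

-- generic grid pass: apply H y to row y for y = 0..n-1
def gpass (H : Nat → List Int → List Int) (n : Nat) (g : List (List Int)) : List (List Int) :=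
  (List.range n).foldl (fun g y => g.modify y (H y)) g

theorem gpass_succ (H : Nat → List Int → List Int) (n : Nat) (g : List (List Int)) :
    gpass H (n+1) g = (gpass H n g).modify n (H n) := by
  simp [gpass, List.range_succ]

theorem gpass_modify_ge (H : Nat → List Int → List Int) (n k : Nat) (f : List Int → List Int)
    (g : List (List Int)) (h : n ≤ k) :
    gpass H n (g.modify k f) = (gpass H n g).modify k f := by
  induction n generalizing g with
  | zero => rfl
  | succ m ih =>
    rw [gpass_succ, gpass_succ, ih g (by omega), List.modify_modify_ne _ _ _ (by omega)]

theorem gpass_fuse (F G : Nat → List Int → List Int) (n : Nat) (g : List (List Int)) :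
    gpass G n (gpass F n g) = gpass (fun y => G y ∘ F y) n g := by
  induction n generalizing g with
  | zero => rfl
  | succ m ih =>
    rw [gpass_succ, gpass_succ, gpass_succ, gpass_modify_ge _ _ _ _ _ (le_refl m), ih,
      List.modify_modify_eq]

theorem gpass_getElem? (H : Nat → List Int → List Int) (n : Nat) (g : List (List Int)) (y : Nat) :
    (gpass H n g)[y]? = if y < n then (H y) <$> g[y]? else g[y]? := by
  induction n generalizing g with
  | zero => simp [gpass]
  | succ m ih =>
    rw [gpass_succ, List.getElem?_modify]
    rcases Nat.lt_trichotomy y m with h | h | h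
    · cases hg : g[y]? <;>
        simp [ih, h, hg, show y < m + 1 by omega, show ¬ m = y by omega]
    · subst h
      cases hg : g[y]? <;>
        simp [ih, hg, show y < y + 1 by omega]
    · cases hg : g[y]? <;>
        simp [ih, hg, show ¬ y < m by omega, show ¬ y < m + 1 by omega, show ¬ m = y by omega]

-- two modifies of the same row agree if the applied functions agree on that row's value
theorem modify_congr_at (g : List (List Int)) (y : Nat) (f f' : List Int → List Int)
    (h : f (g.getD y []) = f' (g.getD y [])) : g.modify y f = g.modify y f' := by
  by_cases hy : y < g.length
  · apply List.ext_getElem?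
    intro j
    rw [List.getElem?_modify, List.getElem?_modify]
    by_cases hj : y = j
    · subst hj
      have hval : g.getD y [] = g[y] := by
        rw [List.getD_eq_getElem?_getD, List.getElem?_eq_getElem hy]
        rfl
      rw [hval] at h
      rw [List.getElem?_eq_getElem hy]
      simp [h]
    · simp [hj]
  · rw [List.modify_eq_self (by omega), List.modify_eq_self (by omega)]

-- fold of same-row modifies fuses into one modify
theorem foldl_modify_fuse (y : Nat) (S : List Int → Nat → List Int) (xs : List Nat)
    (g : List (List Int)) :
    xs.foldl (fun g x => g.modify y (fun r => S r x)) g = g.modify y (fun r => xs.foldl S r) := by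
  induction xs generalizing g with
  | nil => simp [show (fun r : List Int => r) = id from rfl, List.modify_id]
  | cons x xs ih => simp [List.foldl_cons, ih, List.modify_modify_eq, Function.comp_def]

-- row-level pass 1: write V x into cell x for x = 0..n-1
def rcopy (V : Nat → Int) (n : Nat) (r : List Int) : List Int :=
  (List.range n).foldl (fun r x => r.set x (V x)) r

theorem rcopy_succ (V : Nat → Int) (n : Nat) (r : List Int) :
    rcopy V (n+1) r = (rcopy V n r).set n (V n) := by
  simp [rcopy, List.range_succ]

theorem length_rcopy (V : Nat → Int) (n : Nat) (r : List Int) :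
    (rcopy V n r).length = r.length := by
  induction n with
  | zero => rfl
  | succ m ih => rw [rcopy_succ, List.length_set, ih]

theorem rcopy_getElem? (V : Nat → Int) (n : Nat) (r : List Int) (x : Nat) :
    (rcopy V n r)[x]? = if x < n ∧ x < r.length then some (V x) else r[x]? := by
  induction n with
  | zero => simp [rcopy]
  | succ m ih =>
    rw [rcopy_succ, List.getElem?_set]
    rcases Nat.lt_trichotomy x m with h | h | h
    · simp [ih, h, show x < m + 1 by omega, show ¬ m = x by omega]
    · subst h
      by_cases hx : x < r.length <;>
        simp [ih, length_rcopy, hx, show x < x + 1 by omega]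
    · simp [ih, length_rcopy, show ¬ x < m by omega, show ¬ m = x by omega,
        show ¬ x < m + 1 by omega]

theorem rcopy_eq_append (V : Nat → Int) (n : Nat) (r : List Int) (h : n ≤ r.length) :
    rcopy V n r = (List.range n).map V ++ r.drop n := by
  apply List.ext_getElem?
  intro x
  rw [rcopy_getElem?]
  by_cases hx : x < n
  · rw [List.getElem?_append_left (by simpa using hx)]
    simp [hx, show x < r.length by omega]
  · rw [List.getElem?_append_right (by simpa using hx)]
    simp [hx, show ¬ (x < n ∧ x < r.length) by omega]
    congr 1
    omega

-- row-level pass 2 step (A's overlay body on one cell)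
def rstep (mv sv : Nat → Int) (ied shw : Bool) (r : List Int) (x : Nat) : List Int :=
  if sv x > 0 then
    let r1 := r.set x (sv x)
    let r2 := if ied then
        (if !shw then (if r1.getD x 0 == 80 then r1.set x (mv x) else r1) else r1)
      else r1
    if !ied then (if r2.getD x 0 == 80 then r2.set x (mv x) else r2) else r2
  else r

theorem rstep_eq (mv sv : Nat → Int) (ied shw : Bool) (r : List Int) (x : Nat) :
    rstep mv sv ied shw r x =
      if sv x > 0 then
        (if (r.set x (sv x)).getD x 0 = 80 ∧ ¬ (ied = true ∧ shw = true) then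
          (r.set x (sv x)).set x (mv x)
        else r.set x (sv x))
      else r := by
  unfold rstep
  cases ied <;> cases shw <;>
    by_cases h80 : (r.set x (sv x)).getD x 0 = 80 <;> simp [h80]

def rover (mv sv : Nat → Int) (ied shw : Bool) (n : Nat) (r : List Int) : List Int :=
  (List.range n).foldl (rstep mv sv ied shw) r

theorem rover_succ (mv sv : Nat → Int) (ied shw : Bool) (n : Nat) (r : List Int) :
    rover mv sv ied shw (n+1) r = rstep mv sv ied shw (rover mv sv ied shw n r) n := by
  simp [rover, List.range_succ]

theorem rstep_set_ge (mv sv : Nat → Int) (ied shw : Bool) (r : List Int) (x k : Nat) (c : Int)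
    (h : x ≠ k) :
    rstep mv sv ied shw (r.set k c) x = (rstep mv sv ied shw r x).set k c := by
  rw [rstep_eq, rstep_eq]
  have hcomm : ∀ v : Int, (r.set k c).set x v = (r.set x v).set k c := fun v =>
    List.set_comm _ _ (by omega)
  have hget : ((r.set x (sv x)).set k c).getD x 0 = (r.set x (sv x)).getD x 0 := by
    simp [List.getD_eq_getElem?_getD, List.getElem?_set_ne (show k ≠ x by omega)]
  rw [hcomm (sv x), hget]
  split_ifs with hs hc
  · exact List.set_comm _ _ (by omega)
  · rfl
  · rfl

theorem rover_set_ge (mv sv : Nat → Int) (ied shw : Bool) (n : Nat) (r : List Int) (k : Nat)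
    (c : Int) (h : n ≤ k) :
    rover mv sv ied shw n (r.set k c) = (rover mv sv ied shw n r).set k c := by
  induction n generalizing r with
  | zero => rfl
  | succ m ih =>
    rw [rover_succ, rover_succ, ih _ (by omega), rstep_set_ge _ _ _ _ _ _ _ _ (by omega)]

-- the merged per-cell value (B's comprehension body, at Nat index x)
def pvMerge (mv sv : Nat → Int) (ied shw : Bool) (x : Nat) : Int :=
  if sv x > 0 && (sv x != 80 || (ied && shw)) then sv x else mv x

-- the crux: A's two row passes compose to one write of the merged value per cell
theorem row_fuse (mv sv : Nat → Int) (ied shw : Bool) (n : Nat) (r : List Int) (h : n ≤ r.length) :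
    rover mv sv ied shw n (rcopy mv n r) = rcopy (pvMerge mv sv ied shw) n r := by
  induction n with
  | zero => rfl
  | succ m ih =>
    have hm : m ≤ r.length := by omega
    rw [rover_succ, rcopy_succ, rover_set_ge _ _ _ _ _ _ _ _ (le_refl m), ih hm, rcopy_succ]
    have hlen' : m < (rcopy (pvMerge mv sv ied shw) m r).length := by
      rw [length_rcopy]; omega
    have hget : ∀ v : Int, ((rcopy (pvMerge mv sv ied shw) m r).set m v).getD m 0 = v := by
      intro v
      rw [List.getD_eq_getElem?_getD, List.getElem?_set_self hlen']
      rfl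
    rw [rstep_eq]
    by_cases hs : sv m > 0
    · rw [if_pos hs, List.set_set, hget (sv m)]
      by_cases h80 : sv m = 80 <;> cases ied <;> cases shw <;>
        simp [pvMerge, hs, h80, List.set_set]
    · rw [if_neg hs]
      simp [pvMerge, hs]

-- A's pass-2 body on one cell, abbreviated
def stepA (lm ls : List (List Int)) (ied shw : Bool) (g : List (List Int)) (y x : Int) :
    List (List Int) :=
  if pvCell ls y x > 0 then
    let g2 := pvSet g y x (pvCell ls y x)
    let g3 := if ied then
        (if !shw then (if pvCell g2 y x == 80 then pvSet g2 y x (pvCell lm y x) else g2) else g2)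
      else g2
    if !ied then (if pvCell g3 y x == 80 then pvSet g3 y x (pvCell lm y x) else g3) else g3
  else g

-- grid-level reads of a just-modified row, valid also out of range because [].set = []
theorem read_modify_set (g : List (List Int)) (y x : Nat) (v : Int) :
    (g.modify y (fun r => r.set x v)).getD y [] = (g.getD y []).set x v := by
  by_cases hy : y < g.length
  · have : g.getD y [] = g[y] := by
      simp [List.getD_eq_getElem?_getD, List.getElem?_eq_getElem hy]
    rw [this, List.getD_eq_getElem?_getD, List.getElem?_modify_eq,
      List.getElem?_eq_getElem hy]
    rfl
  · rw [List.modify_eq_self (by omega)]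
    have hnone : g[y]? = none := List.getElem?_eq_none (by omega)
    simp [List.getD_eq_getElem?_getD, hnone]

theorem passA2_step (lm ls : List (List Int)) (ied shw : Bool) (y x : Nat)
    (g : List (List Int)) :
    stepA lm ls ied shw g (y : Int) (x : Int)
      = g.modify y (fun r =>
          rstep (fun i => (lm.getD y []).getD i 0) (fun i => (ls.getD y []).getD i 0)
            ied shw r x) := by
  unfold stepA
  simp only [pvCell, pvSet, Int.toNat_natCast]
  have hr1 : (g.modify y fun r => r.set x ((ls.getD y []).getD x 0)).getD y []
      = (g.getD y []).set x ((ls.getD y []).getD x 0) := read_modify_set g y x _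
  by_cases hs : (ls.getD y []).getD x 0 > 0
  · rw [if_pos hs]
    by_cases h80 : ((g.getD y []).set x ((ls.getD y []).getD x 0)).getD x 0 = 80 <;>
      cases ied <;> cases shw <;>
        simp only [Bool.not_true, Bool.not_false, Bool.false_eq_true, Bool.true_eq_false,
          if_true, if_false, ite_true, ite_false, beq_iff_eq, hr1, h80,
          List.modify_modify_eq, eq_self_iff_true, not_true, not_false_iff] <;>
      · apply modify_congr_at
        simp only [Function.comp_apply, rstep_eq]
        rw [if_pos hs]
        split_ifs with hc <;> simp_all [List.set_set]
  · rw [if_neg hs]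
    have hid : g = g.modify y id := (List.modify_id _ _).symm
    conv_lhs => rw [hid]
    apply modify_congr_at
    rw [rstep_eq, if_neg hs]
    rfl

-- B's merged row prefix is the per-cell merged values
theorem merged_eq (a b : List Int) (N : Nat) (ied shw : Bool)
    (ha : N ≤ a.length) (hb : N ≤ b.length) :
    ((a.take N).zip (b.take N)).map
        (fun p => if p.2 > 0 && (p.2 != 80 || (ied && shw)) then p.2 else p.1)
      = (List.range N).map
          (pvMerge (fun x => a.getD x 0) (fun x => b.getD x 0) ied shw) := by
  apply List.ext_getElem
  · simp
    omega
  · intro i h1 h2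
    have hia : i < a.length := by simp at h2; omega
    have hib : i < b.length := by simp at h2; omega
    have hi : i < N := by simp at h2; omega
    simp [List.getElem_zip, List.getElem_take, pvMerge,
      List.getD_eq_getElem?_getD, List.getElem?_eq_getElem hia,
      List.getElem?_eq_getElem hib, hi]

theorem pv_map_some_congr {a b : Type} (f g : a -> b) (x : a) (h : f x = g x) :
    f <$> (some x) = g <$> (some x) := by
  simp [h]

theorem mem_take_self {a : Type} (l : List a) (N i : Nat) (hiN : i < N) (hil : i < l.length) :
    l[i] ∈ l.take N := by
  have hx : i < (l.take N).length := by
    simp [List.length_take]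
    omega
  have h := List.getElem_mem hx
  rwa [List.getElem_take] at h

-- ===== VERDICT (by name: the statement is the Claim_ definition above) =====
theorem get_obspace_render_spec : Claim_equal_get_obspace_render := by
  intro os lm ls n ied shw _ hpre
  obtain ⟨h1, h2, h3, h4, h5, h6⟩ := hpre
  unfold Spec_get_obspace_render
  have hA2 : get_obspace_render os lm ls n ied shw
      = gpass (fun y => (fun r => rover (fun i => (lm.getD y []).getD i 0)
              (fun i => (ls.getD y []).getD i 0) ied shw n.toNat r))
          n.toNat
          (gpass (fun y r => rcopy (fun i => (lm.getD y []).getD i 0) n.toNat r) n.toNat os) := by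
    show (PySem.List.pyRange 0 n 1).foldl
          (fun g y => (PySem.List.pyRange 0 n 1).foldl (fun g x => stepA lm ls ied shw g y x) g)
          ((PySem.List.pyRange 0 n 1).foldl
            (fun g y => (PySem.List.pyRange 0 n 1).foldl
              (fun g x => pvSet g y x (pvCell lm y x)) g) os) = _
    simp only [pv_foldl_pyRange, pvSet, pvCell, Int.toNat_natCast, passA2_step,
      foldl_modify_fuse]
    rfl
  have hB2 : get_obspace_render_alt os lm ls n ied shw
      = gpass (fun y r =>
          (((PySem.List.slice (lm.getD y []) none (some n)).zip
            (PySem.List.slice (ls.getD y []) none (some n))).map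
            (fun p => if p.2 > 0 && (p.2 != 80 || (ied && shw)) then p.2 else p.1))
          ++ r.drop (PySem.List.clampIdx r.length n)) n.toNat os := by
    show (PySem.List.pyRange 0 n 1).foldl (fun g y =>
        g.modify y.toNat (fun r =>
          (((PySem.List.slice (lm.getD y.toNat []) none (some n)).zip
            (PySem.List.slice (ls.getD y.toNat []) none (some n))).map
            (fun p => if p.2 > 0 && (p.2 != 80 || (ied && shw)) then p.2 else p.1))
          ++ r.drop (PySem.List.clampIdx r.length n))) os = _
    simp only [pv_foldl_pyRange, Int.toNat_natCast]
    rfl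
  rw [hA2, hB2, gpass_fuse]
  apply List.ext_getElem?
  intro y
  rw [gpass_getElem?, gpass_getElem?]
  by_cases hy : y < n.toNat
  case neg => rw [if_neg hy, if_neg hy]
  rw [if_pos hy, if_pos hy]
  have hyos : y < os.length := by omega
  have hylm : y < lm.length := by omega
  have hyls : y < ls.length := by omega
  have hglm : lm.getD y [] = lm[y] := by
    rw [List.getD_eq_getElem?_getD, List.getElem?_eq_getElem hylm]
    rfl
  have hgls : ls.getD y [] = ls[y] := by
    rw [List.getD_eq_getElem?_getD, List.getElem?_eq_getElem hyls]
    rfl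
  have hr : n.toNat ≤ (os[y]).length := by
    have := h4 _ (mem_take_self os n.toNat y hy hyos)
    omega
  have ha : n.toNat ≤ (lm.getD y []).length := by
    rw [hglm]
    have := h5 _ (mem_take_self lm n.toNat y hy hylm)
    omega
  have hb : n.toNat ≤ (ls.getD y []).length := by
    rw [hgls]
    have := h6 _ (mem_take_self ls n.toNat y hy hyls)
    omega
  rw [List.getElem?_eq_getElem hyos]
  apply pv_map_some_congr
  simp only [Function.comp_apply]
  rw [row_fuse _ _ _ _ _ _ hr, rcopy_eq_append _ _ _ hr]
  have hslice : ∀ (l : List Int), PySem.List.slice l none (some n) = l.take n.toNat :=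
    fun l => PySem.List.slice_to _ (by omega)
  rw [hslice, hslice, merged_eq _ _ _ ied shw ha hb]
  have hclamp : PySem.List.clampIdx (os[y]).length n = n.toNat := by
    have hn : n = ((n.toNat : Nat) : Int) := by omega
    rw [hn, PySem.List.clampIdx_natCast]
    omega
  rw [hclamp]
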